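-- pv_equiv track=rewrite | github.com/arthur-H2W33/AOC | 2023/src/2k23D2.py | minimumdices
-- ===== SOURCE A (Python) =====
-- def minimumdices(game):
--     listeRGB=[0,0,0]
--     for pierres in game[1]:
--         if pierres.split(' ')[-1]=='green':
--             listeRGB[1]=max(listeRGB[1],int(pierres.split(' ')[0]))
--         elif pierres.split(' ')[-1]=='blue':
--             listeRGB[2]=max(listeRGB[2],int(pierres.split(' ')[0]))
--         elif pierres.split(' ')[-1]=='red':
--             listeRGB[0]=max(listeRGB[0],int(pierres.split(' ')[0]))
--     return listeRGB[0]*listeRGB[1]*listeRGB[2]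
-- ===== SOURCE B (Python) =====
-- def minimumdices(game):
--     def best(color):
--         vals = [int(p.split(' ')[0]) for p in game[1] if p.split(' ')[-1] == color]
--         return max([0] + vals)
--     return best('red') * best('green') * best('blue')
-- ===== Notes on version B (the rewrite author's own statement) =====
-- stated objective: idiomatic
-- what changed: A's single fold that branches on the color and updates a 3-cell accumulator is replaced by three independent filter-then-max comprehensions (one per color) whose results are multiplied.
import Mathlib
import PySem

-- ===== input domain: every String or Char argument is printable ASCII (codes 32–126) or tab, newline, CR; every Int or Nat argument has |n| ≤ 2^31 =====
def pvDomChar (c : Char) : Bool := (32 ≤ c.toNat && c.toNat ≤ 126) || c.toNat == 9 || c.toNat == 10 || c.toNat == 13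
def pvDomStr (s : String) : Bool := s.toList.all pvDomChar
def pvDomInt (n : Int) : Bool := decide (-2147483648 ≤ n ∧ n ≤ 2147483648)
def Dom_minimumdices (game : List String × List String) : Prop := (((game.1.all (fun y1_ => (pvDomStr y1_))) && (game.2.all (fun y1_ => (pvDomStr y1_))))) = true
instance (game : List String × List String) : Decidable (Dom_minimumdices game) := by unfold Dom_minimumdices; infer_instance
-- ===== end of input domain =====

-- B replaces A's single branching fold over a 3-cell accumulator by three independent
-- filter-then-max passes, one per color (objective: idiomatic).

-- ===== PORT A =====
-- one iteration of A's loop body over the state (red, green, blue);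
-- parts[-1] / parts[0] via pyGetD (split never yields []); int(...) via ofStr?,
-- totalized with .getD 0 — Pre_ guarantees the parse succeeds where A reaches it
def pvAStep (rgb : Int × Int × Int) (p : String) : Int × Int × Int :=
  let parts := (PySem.Str.split? p " ").getD []
  if PySem.List.pyGetD parts (-1) "" = "green" then
    (rgb.1, max rgb.2.1 ((PySem.Int.ofStr? (PySem.List.pyGetD parts 0 "")).getD 0), rgb.2.2)
  else if PySem.List.pyGetD parts (-1) "" = "blue" then
    (rgb.1, rgb.2.1, max rgb.2.2 ((PySem.Int.ofStr? (PySem.List.pyGetD parts 0 "")).getD 0))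
  else if PySem.List.pyGetD parts (-1) "" = "red" then
    (max rgb.1 ((PySem.Int.ofStr? (PySem.List.pyGetD parts 0 "")).getD 0), rgb.2.1, rgb.2.2)
  else rgb

def minimumdices (game : List String × List String) : Int :=
  let l := game.2.foldl pvAStep (0, 0, 0)
  l.1 * l.2.1 * l.2.2

-- ===== PORT B =====
-- vals = [int(p.split(' ')[0]) for p in game[1] if p.split(' ')[-1] == color]
def pvVals (ps : List String) (c : String) : List Int :=
  (ps.filter (fun p => PySem.List.pyGetD ((PySem.Str.split? p " ").getD []) (-1) "" == c)).map
    (fun p => (PySem.Int.ofStr? (PySem.List.pyGetD ((PySem.Str.split? p " ").getD []) 0 "")).getD 0)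

-- best(color) = max([0] + vals)
def pvBest (ps : List String) (c : String) : Int :=
  PySem.List.maxD ((0 : Int) :: pvVals ps c) id 0

def minimumdices_alt (game : List String × List String) : Int :=
  pvBest game.2 "red" * pvBest game.2 "green" * pvBest game.2 "blue"

-- ===== PRECONDITION & SPEC =====
-- Pre_ excludes exactly the inputs on which Python A raises ValueError: a stone whose
-- last space-separated field is a color name but whose first field is not an int literal.
def Pre_minimumdices (game : List String × List String) : Prop :=
  ∀ p ∈ game.2,
    (PySem.List.pyGetD ((PySem.Str.split? p " ").getD []) (-1) "" = "green" ∨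
     PySem.List.pyGetD ((PySem.Str.split? p " ").getD []) (-1) "" = "blue" ∨
     PySem.List.pyGetD ((PySem.Str.split? p " ").getD []) (-1) "" = "red") →
    (PySem.Int.ofStr? (PySem.List.pyGetD ((PySem.Str.split? p " ").getD []) 0 "")).isSome
instance (game : List String × List String) : Decidable (Pre_minimumdices game) := by
  unfold Pre_minimumdices; infer_instance

def pvWitness_minimumdices : (List String × List String) := ([], ["3 red", "2 green", "5 blue"])

def Spec_minimumdices (game : List String × List String) (out : Int) : Prop := out = minimumdices_alt game
instance (game : List String × List String) (out : Int) : Decidable (Spec_minimumdices game out) := by unfold Spec_minimumdices; infer_instance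

-- ===== CLAIM (what is proved, stated in full; the proofs are below) =====
def Claim_equal_minimumdices : Prop := ∀ (game : List String × List String), Dom_minimumdices game → Pre_minimumdices game → Spec_minimumdices game (minimumdices game)

-- ===== LEMMAS AND PROOFS =====

-- max? of a nonempty Int list with key id is a foldl of max over the tail
lemma pv_max?_cons : ∀ (l : List Int) (a : Int),
    PySem.List.max? (a :: l) id = some (l.foldl max a) := by
  intro l
  induction l with
  | nil => intro a; rfl
  | cons x xs ih =>
      intro a
      have h1 : PySem.List.max? (a :: x :: xs) id
          = PySem.List.max? ((if id a < id x then x else a) :: xs) id := by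
        simp only [PySem.List.max?, List.foldl_cons]
        split_ifs <;> rfl
      rw [h1, ih]
      simp only [List.foldl_cons, Option.some.injEq]
      congr 1
      split_ifs with h
      · exact (max_eq_right h.le).symm
      · exact (max_eq_left (not_lt.mp h)).symm

lemma pv_maxD_zero_cons (l : List Int) :
    PySem.List.maxD ((0 : Int) :: l) id 0 = l.foldl max 0 := by
  simp only [PySem.List.maxD, pv_max?_cons, Option.getD_some]

-- A's fold, started from an arbitrary state, is the triple of per-color max-folds
lemma pv_fold_eq (ps : List String) : ∀ r g b : Int,
    ps.foldl pvAStep (r, g, b) =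
      ((pvVals ps "red").foldl max r, (pvVals ps "green").foldl max g,
       (pvVals ps "blue").foldl max b) := by
  induction ps with
  | nil => intro r g b; simp [pvVals]
  | cons p ps ih =>
      intro r g b
      simp only [List.foldl_cons]
      by_cases hg : PySem.List.pyGetD ((PySem.Str.split? p " ").getD []) (-1) "" = "green"
      · simp [pvAStep, hg, pvVals, ih]
      · by_cases hb : PySem.List.pyGetD ((PySem.Str.split? p " ").getD []) (-1) "" = "blue"
        · simp [pvAStep, hb, pvVals, ih]
        · by_cases hr : PySem.List.pyGetD ((PySem.Str.split? p " ").getD []) (-1) "" = "red"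
          · simp [pvAStep, hr, pvVals, ih]
          · simp [pvAStep, hg, hb, hr, pvVals, ih]

-- ===== VERDICT (by name: the statement is the Claim_ definition above) =====
theorem minimumdices_spec : Claim_equal_minimumdices := by
  intro game _ _
  unfold Spec_minimumdices minimumdices minimumdices_alt pvBest
  rw [pv_fold_eq game.2 0 0 0]
  simp only [pv_maxD_zero_cons]
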